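-- pv_equiv track=rewrite | github.com/SmocIng/personal-data-masking | src/counter.py | count_masked_info
-- ===== SOURCE A (Python) =====
-- from collections import Counter
--
-- def count_masked_info(masked_items):
--     """
--     マスキングされた個人情報の種類ごとのカウントを行う
--
--     Args:
--         masked_items (list): マスキングされた項目のリスト
--
--     Returns:
--         dict: タイプごとのカウント情報
--     """
--     if not masked_items:
--         return {
--             'name': 0,
--             'phone': 0,
--             'date': 0,
--             'email': 0,
--             'address': 0,
--             'company': 0,
--             'total': 0
--         }
--
--     # カウンターを作成
--     counter = Counter()
--
--     # 各マスキングアイテムをカウント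
--     for item in masked_items:
--         item_type = item.split(':')[0] if ':' in item else 'unknown'
--         counter[item_type] += 1
--
--     # 結果を辞書として整形
--     result = {
--         'name': counter.get('name', 0),
--         'phone': counter.get('phone', 0),
--         'date': counter.get('date', 0),
--         'email': counter.get('email', 0),
--         'address': counter.get('address', 0),
--         'company': counter.get('company', 0),
--     }
--
--     # 合計を追加
--     result['total'] = sum(result.values())
--
--     return result
-- ===== SOURCE B (Python) =====
-- def count_masked_info(masked_items):
--     result = {k: sum(1 for item in masked_items if item.startswith(k + ':'))
--               for k in ('name', 'phone', 'date', 'email', 'address', 'company')}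
--     result['total'] = sum(result.values())
--     return result
-- ===== Notes on version B (the rewrite author's own statement) =====
-- stated objective: simpler
-- what changed: Drops the prefix extraction (split on ':'), the Counter frequency table and the empty-list special case entirely: since no known key contains a colon, an item is of type k exactly when it starts with 'k:', so B builds the dict by counting items with that literal prefix per key.
import Mathlib
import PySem

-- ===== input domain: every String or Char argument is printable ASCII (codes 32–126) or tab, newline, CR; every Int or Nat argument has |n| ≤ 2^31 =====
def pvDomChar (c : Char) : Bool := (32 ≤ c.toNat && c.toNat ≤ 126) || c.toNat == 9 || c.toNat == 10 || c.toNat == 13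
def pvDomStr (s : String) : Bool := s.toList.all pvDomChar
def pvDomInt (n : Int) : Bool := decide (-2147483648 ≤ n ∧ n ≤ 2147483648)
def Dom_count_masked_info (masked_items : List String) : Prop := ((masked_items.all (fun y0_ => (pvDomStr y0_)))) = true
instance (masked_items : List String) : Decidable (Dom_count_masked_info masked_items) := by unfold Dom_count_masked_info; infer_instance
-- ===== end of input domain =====

-- B drops the split-based prefix extraction, the Counter table and the empty-list
-- special case: an item has type k (no known key contains ':') iff it starts with "k:",
-- so B counts items with that literal prefix per key (simpler).


-- ===== PORT A =====
-- "item.split(':')[0] if ':' in item else 'unknown'": split with the nonempty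
-- separator ':' always returns a nonempty list, so [0] is its head and never raises (exact).
def pvItemType (item : String) : String :=
  if PySem.Str.isIn ":" item then ((PySem.Str.split? item ":").getD []).headD "" else "unknown"

def count_masked_info (masked_items : List String) : List (String × Int) :=
  if masked_items = [] then
    [("name", 0), ("phone", 0), ("date", 0), ("email", 0), ("address", 0), ("company", 0), ("total", 0)]
  else
    let counter : PySem.Dict String Int :=
      masked_items.foldl (fun d item => d.modify (pvItemType item) 0 (· + 1)) PySem.Dict.empty
    let result : List (String × Int) :=
      [("name", counter.getD "name" 0), ("phone", counter.getD "phone" 0),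
       ("date", counter.getD "date" 0), ("email", counter.getD "email" 0),
       ("address", counter.getD "address" 0), ("company", counter.getD "company" 0)]
    result ++ [("total", (result.map (·.2)).sum)]

-- ===== PORT B =====
-- "sum(1 for item in masked_items if item.startswith(k + ':'))" = length of the filtered list
def count_masked_info_alt (masked_items : List String) : List (String × Int) :=
  let result : List (String × Int) :=
    ["name", "phone", "date", "email", "address", "company"].map
      (fun k => (k, ((masked_items.filter (fun item => PySem.Str.startswith item (k ++ ":"))).length : Int)))
  result ++ [("total", (result.map (·.2)).sum)]

-- ===== PRECONDITION & SPEC =====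
def Spec_count_masked_info (masked_items : List String) (out : List (String × Int)) : Prop := out = count_masked_info_alt masked_items
instance (masked_items : List String) (out : List (String × Int)) : Decidable (Spec_count_masked_info masked_items out) := by unfold Spec_count_masked_info; infer_instance

-- ===== CLAIM (what is proved, stated in full; the proofs are below) =====
def Claim_equal_count_masked_info : Prop := ∀ (masked_items : List String), Dom_count_masked_info masked_items → Spec_count_masked_info masked_items (count_masked_info masked_items)

-- ===== LEMMAS AND PROOFS =====

-- splitOn.go pushes finished chunks onto acc and reverses acc at the end.
theorem pvGo_acc (sep : List Char) (fuel : Nat) (l cur : List Char) (acc : List (List Char)) :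
    PySem.Chars.splitOn.go sep fuel l cur acc
      = acc.reverse ++ PySem.Chars.splitOn.go sep fuel l cur [] := by
  induction fuel generalizing l cur acc with
  | zero => simp [PySem.Chars.splitOn.go]
  | succ fuel ih =>
      cases l with
      | nil => simp [PySem.Chars.splitOn.go]
      | cons c rest =>
          rw [PySem.Chars.splitOn.go, PySem.Chars.splitOn.go]
          split_ifs with h
          · rw [ih _ _ (cur.reverse :: acc), ih _ _ (cur.reverse :: [])]
            simp
          · rw [ih rest (c :: cur) acc]

-- The first chunk of a single-character split is cur.reverse ++ takeWhile (≠ c).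
theorem pvGo_first (c : Char) (fuel : Nat) (l cur : List Char) (h : l.length < fuel) :
    (PySem.Chars.splitOn.go [c] fuel l cur []).head?
      = some (cur.reverse ++ l.takeWhile (fun x => x != c)) := by
  induction fuel generalizing l cur with
  | zero => omega
  | succ fuel ih =>
      cases l with
      | nil => simp [PySem.Chars.splitOn.go]
      | cons ch rest =>
          rw [PySem.Chars.splitOn.go]
          split_ifs with hp
          · have hc : c = ch := by
              simpa [List.isPrefixOf] using hp
            rw [pvGo_acc]
            simp [← hc, List.takeWhile]
          · have hc : ¬ (c == ch) := by
              simpa [List.isPrefixOf] using hp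
            rw [ih rest (ch :: cur) (by simpa using Nat.lt_of_succ_lt_succ h)]
            have hne : (ch != c) = true := by
              cases hb : ch == c
              · simp [bne, hb]
              · exact absurd (by simpa [eq_comm] using (beq_iff_eq.mp hb)) (fun he => hc (beq_iff_eq.mpr he))
            simp [List.takeWhile, hne]

theorem pvTakeWhile_eq_iff (cs ks : List Char) (hk : ':' ∉ ks) (hc : ':' ∈ cs) :
    cs.takeWhile (fun x => x != ':') = ks ↔ (ks ++ [':']) <+: cs := by
  induction cs generalizing ks with
  | nil => cases hc
  | cons c cs' ih =>
      by_cases h : c = ':'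
      · subst h
        simp only [List.takeWhile]
        cases ks with
        | nil => simp
        | cons k' ks' =>
            constructor
            · intro habs; simp at habs
            · intro hpre
              rcases hpre with ⟨t, ht⟩
              simp at ht
              exact absurd ht.1.symm (by intro he; exact hk (he ▸ List.mem_cons_self))
      · have hne : (c != ':') = true := by
          cases hb : c == ':'
          · simp [bne, hb]
          · exact absurd (beq_iff_eq.mp hb) h
        have hc' : ':' ∈ cs' := by
          rcases List.mem_cons.mp hc with h1 | h1
          · exact absurd h1.symm h
          · exact h1
        cases ks with
        | nil =>
            simp only [List.takeWhile, hne]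
            constructor
            · intro habs; simp at habs
            · intro hpre
              rcases hpre with ⟨t, ht⟩
              simp at ht
              exact absurd ht.1 (fun he => h he.symm)
        | cons k' ks' =>
            simp only [List.takeWhile, hne]
            constructor
            · intro he
              have h1 : c = k' ∧ cs'.takeWhile (fun x => x != ':') = ks' := by
                simpa using he
              rcases h1 with ⟨h1, h2⟩
              subst h1
              have := (ih ks' (fun hm => hk (List.mem_cons_of_mem _ hm)) hc').mp h2
              show c :: ks' ++ [':'] <+: c :: cs'
              exact List.cons_prefix_cons.mpr ⟨rfl, this⟩
            · intro hpre
              have h1 := List.cons_prefix_cons.mp (by simpa using hpre)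
              rcases h1 with ⟨h1, h2⟩
              subst h1
              have := (ih ks' (fun hm => hk (List.mem_cons_of_mem _ hm)) hc').mpr h2
              simp [this]

-- the per-item characterization: for a colon-free key k ≠ "unknown",
-- pvItemType item = k  ↔  item starts with k ++ ":".
theorem pvItemType_eq_iff (item k : String) (hk : ':' ∉ k.toList) (hu : k ≠ "unknown") :
    (pvItemType item = k) = (PySem.Str.startswith item (k ++ ":") = true) := by
  have hcl : (":" : String).toList = [':'] := by decide
  have hsw : PySem.Str.startswith item (k ++ ":") = true ↔ (k.toList ++ [':']) <+: item.toList := by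
    rw [PySem.Str.startswith_eq, PySem.Chars.startswith_iff]
    simp
  unfold pvItemType
  by_cases hin : PySem.Str.isIn ":" item = true
  · rw [if_pos hin]
    have hmem : ':' ∈ item.toList := by
      have hinf := (PySem.Str.isIn_iff_infix ":" item).mp hin
      exact hinf.subset (by rw [hcl]; exact List.mem_singleton.mpr rfl)
    have hhead : (PySem.Chars.splitOn item.toList [':']).head?
        = some (item.toList.takeWhile (fun x => x != ':')) := by
      unfold PySem.Chars.splitOn
      simpa using pvGo_first ':' (item.toList.length + 1) item.toList [] (Nat.lt_succ_self _)
    have hsplit : ((PySem.Str.split? item ":").getD []).headD ""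
        = String.ofList (item.toList.takeWhile (fun x => x != ':')) := by
      unfold PySem.Str.split?
      rw [hcl]
      rcases hl : PySem.Chars.splitOn item.toList [':'] with _ | ⟨hd, tl⟩
      · rw [hl] at hhead; simp at hhead
      · rw [hl] at hhead
        simp only [List.head?, Option.some.injEq] at hhead
        simp [PySem.Chars.split?, hl, hhead]
    rw [hsplit]
    have hof : (String.ofList (item.toList.takeWhile (fun x => x != ':')) = k)
        ↔ item.toList.takeWhile (fun x => x != ':') = k.toList := by
      constructor
      · intro h; rw [← h, String.toList_ofList]
      · intro h
        rw [h]
        exact String.ofList_toList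
    simp only [eq_iff_iff]
    rw [hof, hsw]
    exact pvTakeWhile_eq_iff item.toList k.toList hk hmem
  · rw [if_neg hin]
    have hmem : ':' ∉ item.toList := by
      intro hm
      apply hin
      rw [PySem.Str.isIn_iff_infix]
      rcases List.mem_iff_append.mp hm with ⟨s, t, hst⟩
      exact ⟨s, t, by rw [hcl]; simpa using hst.symm⟩
    simp only [eq_iff_iff]
    constructor
    · intro h; exact absurd h.symm hu
    · intro h
      exact absurd (List.IsPrefix.subset (hsw.mp h) (by simp)) hmem

-- A's counter lookup for key k = B's filtered count.
theorem pvCount_eq (xs : List String) (k : String) (hk : ':' ∉ k.toList) (hu : k ≠ "unknown") :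
    (xs.foldl (fun d item => d.modify (pvItemType item) 0 (· + 1)) PySem.Dict.empty).getD k 0
      = ((xs.filter (fun item => PySem.Str.startswith item (k ++ ":"))).length : Int) := by
  rw [show xs.foldl (fun d item => d.modify (pvItemType item) 0 (· + 1)) PySem.Dict.empty
        = PySem.Dict.counter (xs.map pvItemType) from by
      rw [PySem.Dict.counter_eq_foldl, List.foldl_map],
    PySem.Dict.getD_counter]
  congr 1
  rw [List.count_eq_countP, List.countP_map, ← List.countP_eq_length_filter]
  apply List.countP_congr
  intro item _
  simp only [Function.comp]
  constructor
  · intro h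
    have := beq_iff_eq.mp h
    rw [← pvItemType_eq_iff item k hk hu]; exact this
  · intro h
    exact beq_iff_eq.mpr (by rw [pvItemType_eq_iff item k hk hu]; exact h)

-- ===== VERDICT (by name: the statement is the Claim_ definition above) =====
theorem count_masked_info_spec : Claim_equal_count_masked_info := by
  intro xs _
  unfold Spec_count_masked_info
  by_cases h : xs = []
  · subst h; decide
  · simp only [count_masked_info, count_masked_info_alt, if_neg h]
    rw [pvCount_eq xs "name" (by decide) (by decide),
        pvCount_eq xs "phone" (by decide) (by decide),
        pvCount_eq xs "date" (by decide) (by decide),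
        pvCount_eq xs "email" (by decide) (by decide),
        pvCount_eq xs "address" (by decide) (by decide),
        pvCount_eq xs "company" (by decide) (by decide)]
    simp
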